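-- pv_equiv track=rewrite | github.com/Rijughosh123/AutoRoute | views/routing_algo.py | extract_unique_time_slots
-- ===== SOURCE A (Python) =====
-- def extract_unique_time_slots(time_window):
--     time_slots = set()
--     for slot in time_window:
--         start_time, end_time = slot
--         time_slots.add(start_time)
--         time_slots.add(end_time)
--
--     unique_time_slots = sorted(time_slots)
--     return unique_time_slots
-- ===== SOURCE B (Python) =====
-- def _insert_unique_sorted(lst, t):
--     # insert t into a strictly increasing list, keeping it strictly increasing
--     i = 0
--     n = len(lst)
--     while i < n and lst[i] < t:
--         i += 1
--     if i < n and lst[i] == t: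
--         return lst
--     return lst[:i] + [t] + lst[i:]
--
--
-- def extract_unique_time_slots(time_window):
--     result = []
--     for slot in time_window:
--         start_time, end_time = slot
--         result = _insert_unique_sorted(result, start_time)
--         result = _insert_unique_sorted(result, end_time)
--     return result
-- ===== Notes on version B (the rewrite author's own statement) =====
-- stated objective: alternative
-- what changed: Replaces set accumulation followed by a final sort with incremental ordered insertion: each endpoint is placed into (or skipped from) a strictly increasing result list as it is read, so no set and no sort call exist.
import Mathlib
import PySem

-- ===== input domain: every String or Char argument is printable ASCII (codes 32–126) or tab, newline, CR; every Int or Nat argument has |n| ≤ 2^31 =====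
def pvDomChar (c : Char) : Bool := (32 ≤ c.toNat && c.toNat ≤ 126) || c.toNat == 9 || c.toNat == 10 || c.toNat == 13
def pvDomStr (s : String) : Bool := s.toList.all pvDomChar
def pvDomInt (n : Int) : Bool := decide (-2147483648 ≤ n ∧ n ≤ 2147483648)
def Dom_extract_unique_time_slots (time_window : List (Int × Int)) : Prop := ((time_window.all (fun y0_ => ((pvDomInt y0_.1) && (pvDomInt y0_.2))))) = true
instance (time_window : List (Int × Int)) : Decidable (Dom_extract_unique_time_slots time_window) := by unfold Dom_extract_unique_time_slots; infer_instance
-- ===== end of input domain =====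

-- B replaces A's set-then-sort with incremental ordered insertion into a strictly increasing list (alternative decomposition, no set and no sort; quadratic worst case).


-- ===== PORT A =====
def extract_unique_time_slots (time_window : List (Int × Int)) : List Int :=
  let time_slots : PySem.Set Int :=
    time_window.foldl
      (fun s slot => PySem.Set.add (PySem.Set.add s slot.1) slot.2) PySem.Set.empty
  PySem.List.sorted time_slots (fun x => x) false

-- ===== PORT B =====
-- Source B's _insert_unique_sorted: the while loop scans past elements < t (lst[:i] =
-- takeWhile (< t), lst[i:] = dropWhile (< t)), then either skips (t already present
-- as head of the suffix) or splices [t] between the two slices.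
def pvInsertUniqueSorted (lst : List Int) (t : Int) : List Int :=
  let pre := lst.takeWhile (fun x => x < t)
  let suf := lst.dropWhile (fun x => x < t)
  match suf with
  | x :: _ => if x = t then lst else pre ++ t :: suf
  | [] => pre ++ t :: suf

def extract_unique_time_slots_alt (time_window : List (Int × Int)) : List Int :=
  time_window.foldl
    (fun result slot =>
      pvInsertUniqueSorted (pvInsertUniqueSorted result slot.1) slot.2) []

-- ===== PRECONDITION & SPEC =====
def Spec_extract_unique_time_slots (time_window : List (Int × Int)) (out : List Int) : Prop := out = extract_unique_time_slots_alt time_window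
instance (time_window : List (Int × Int)) (out : List Int) : Decidable (Spec_extract_unique_time_slots time_window out) := by unfold Spec_extract_unique_time_slots; infer_instance

-- ===== CLAIM (what is proved, stated in full; the proofs are below) =====
def Claim_equal_extract_unique_time_slots : Prop := ∀ (time_window : List (Int × Int)), Dom_extract_unique_time_slots time_window → Spec_extract_unique_time_slots time_window (extract_unique_time_slots time_window)

-- ===== LEMMAS AND PROOFS =====

-- A's pairwise Set.add fold is Set.ofList of the flattened endpoint list.
theorem setFold_eq_ofList_flatMap (tw : List (Int × Int)) :
    ∀ s : PySem.Set Int,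
      tw.foldl (fun s slot => PySem.Set.add (PySem.Set.add s slot.1) slot.2) s
        = (tw.flatMap (fun p => [p.1, p.2])).foldl PySem.Set.add s := by
  induction tw with
  | nil => intro s; rfl
  | cons p tw ih =>
      intro s
      simp only [List.foldl_cons, List.flatMap_cons, List.foldl_append]
      exact ih _

theorem insert_cons_lt (x t : Int) (xs : List Int) (h : x < t) :
    pvInsertUniqueSorted (x :: xs) t = x :: pvInsertUniqueSorted xs t := by
  unfold pvInsertUniqueSorted
  simp only [List.takeWhile_cons, List.dropWhile_cons, h, decide_true, if_true]
  cases hd : xs.dropWhile (fun y => y < t) with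
  | nil => simp
  | cons y ys =>
      by_cases hy : y = t <;> simp [hy]

-- Ordered insertion keeps the list strictly increasing and adds exactly {t}.
theorem insert_sorted (t : Int) :
    ∀ lst : List Int, lst.Pairwise (· < ·) →
      (pvInsertUniqueSorted lst t).Pairwise (· < ·) ∧
      (∀ y, y ∈ pvInsertUniqueSorted lst t ↔ y ∈ lst ∨ y = t) := by
  intro lst
  induction lst with
  | nil =>
      intro _
      constructor
      · simp [pvInsertUniqueSorted]
      · intro y; simp [pvInsertUniqueSorted]
  | cons x xs ih =>
      intro hp
      rcases List.pairwise_cons.mp hp with ⟨hx, hxs⟩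
      by_cases hlt : x < t
      · rw [insert_cons_lt x t xs hlt]
        rcases ih hxs with ⟨h1, h2⟩
        constructor
        · rw [List.pairwise_cons]
          refine ⟨fun y hy => ?_, h1⟩
          rcases (h2 y).mp hy with hy | rfl
          · exact hx y hy
          · exact hlt
        · intro y
          simp only [List.mem_cons, h2 y]
          tauto
      · -- x ≥ t: takeWhile = [], dropWhile = x :: xs
        have hdef : pvInsertUniqueSorted (x :: xs) t =
            if x = t then x :: xs else t :: x :: xs := by
          unfold pvInsertUniqueSorted
          simp [hlt]
        rw [hdef]
        by_cases he : x = t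
        · subst he
          rw [if_pos rfl]
          exact ⟨hp, fun y => by simp only [List.mem_cons]; tauto⟩
        · simp only [he, if_false]
          have htx : t < x := lt_of_le_of_ne (not_lt.mp hlt) (fun h => he h.symm)
          constructor
          · rw [List.pairwise_cons]
            refine ⟨fun y hy => ?_, hp⟩
            rcases List.mem_cons.mp hy with rfl | hy
            · exact htx
            · exact lt_trans htx (hx y hy)
          · intro y; simp only [List.mem_cons]; tauto

-- Fold invariant: B's accumulator stays strictly increasing and collects exactly
-- the endpoints seen so far.
theorem fold_invariant (tw : List (Int × Int)) :
    ∀ res : List Int, res.Pairwise (· < ·) →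
      (tw.foldl (fun result slot =>
          pvInsertUniqueSorted (pvInsertUniqueSorted result slot.1) slot.2) res).Pairwise (· < ·) ∧
      (∀ y, y ∈ tw.foldl (fun result slot =>
          pvInsertUniqueSorted (pvInsertUniqueSorted result slot.1) slot.2) res ↔
        y ∈ res ∨ y ∈ tw.flatMap (fun p => [p.1, p.2])) := by
  induction tw with
  | nil =>
      intro res hres
      exact ⟨hres, fun y => by simp⟩
  | cons p tw ih =>
      intro res hres
      rcases insert_sorted p.1 res hres with ⟨h1, h2⟩
      rcases insert_sorted p.2 _ h1 with ⟨h3, h4⟩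
      rcases ih _ h3 with ⟨h5, h6⟩
      refine ⟨h5, fun y => ?_⟩
      simp only [List.foldl_cons] at h5 h6 ⊢
      rw [h6 y]
      simp only [h4 y, h2 y, List.flatMap_cons, List.mem_append, List.mem_cons,
        List.not_mem_nil]
      tauto

theorem extract_unique_time_slots_eq (tw : List (Int × Int)) :
    extract_unique_time_slots tw = extract_unique_time_slots_alt tw := by
  unfold extract_unique_time_slots extract_unique_time_slots_alt
  have hset : tw.foldl (fun s slot => PySem.Set.add (PySem.Set.add s slot.1) slot.2) PySem.Set.empty
      = PySem.Set.ofList (tw.flatMap (fun p => [p.1, p.2])) := by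
    rw [setFold_eq_ofList_flatMap, PySem.Set.ofList_eq_foldl]
    rfl
  rw [hset]
  obtain ⟨hB1, hB2⟩ := fold_invariant tw [] List.Pairwise.nil
  set B := tw.foldl (fun result slot =>
      pvInsertUniqueSorted (pvInsertUniqueSorted result slot.1) slot.2) [] with hBdef
  have hBnodup : B.Nodup := hB1.imp (fun h => ne_of_lt h)
  have hSnodup : (PySem.Set.ofList (tw.flatMap (fun p => [p.1, p.2]))).Nodup :=
    PySem.Set.nodup_ofList _
  have hmem : ∀ y, y ∈ B ↔ y ∈ PySem.Set.ofList (tw.flatMap (fun p => [p.1, p.2])) := by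
    intro y
    rw [hB2 y, PySem.Set.mem_ofList]
    simp
  have hperm : B.Perm (PySem.Set.ofList (tw.flatMap (fun p => [p.1, p.2]))) :=
    (List.perm_ext_iff_of_nodup hBnodup hSnodup).mpr hmem
  exact PySem.List.sorted_eq_of_perm_of_pairwise_lt _ _ _ hperm hB1

-- ===== VERDICT (by name: the statement is the Claim_ definition above) =====
theorem extract_unique_time_slots_spec : Claim_equal_extract_unique_time_slots := by
  intro tw _
  exact extract_unique_time_slots_eq tw
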